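-- pv_equiv track=rewrite | github.com/TomasLiutvinas/boot-dev-static-gen | src/main.py | extract_title
-- ===== SOURCE A (Python) =====
-- def extract_title(markdown):
--     title = None
--     items = markdown.splitlines()
--     for item in items:
--         if len(item) > 0 and item.startswith("#"):
--             title = item.strip("#").strip(" ")
--
--     if title == None:
--         raise Exception("No title")
--
--     return title
-- ===== SOURCE B (Python) =====
-- def extract_title(markdown):
--     for item in reversed(markdown.splitlines()):
--         if len(item) > 0 and item.startswith("#"):
--             return item.strip("#").strip(" ")
--     raise Exception("No title")
-- ===== Notes on version B (the rewrite author's own statement) =====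
-- stated objective: simpler
-- what changed: Replaces the forward scan that overwrites a None-sentinel accumulator with a reverse search that returns the first heading it meets, needing no accumulator and stopping early.
import Mathlib
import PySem

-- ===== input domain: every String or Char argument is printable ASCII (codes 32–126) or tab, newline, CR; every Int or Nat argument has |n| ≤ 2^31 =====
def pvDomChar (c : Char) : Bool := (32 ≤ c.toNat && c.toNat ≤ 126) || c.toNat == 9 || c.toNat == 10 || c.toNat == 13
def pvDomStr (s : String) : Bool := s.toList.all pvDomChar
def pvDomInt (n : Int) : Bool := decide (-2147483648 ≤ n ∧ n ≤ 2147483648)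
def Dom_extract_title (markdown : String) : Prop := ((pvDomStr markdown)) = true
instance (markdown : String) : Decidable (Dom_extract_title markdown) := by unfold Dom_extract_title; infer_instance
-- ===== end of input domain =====

-- B replaces A's forward scan-all-and-keep-last with a reverse search returning the first
-- heading it meets (simpler: no accumulator, early exit); same strip calls, same exception.

-- ===== PORT A =====
-- is this line a heading?  len(item) > 0 and item.startswith("#")
def pvIsHeading (item : String) : Bool :=
  decide (PySem.Str.len item > 0) && PySem.Str.startswith item "#"

-- item.strip("#").strip(" ")
def pvStripTitle (item : String) : String :=
  PySem.Str.stripChars (PySem.Str.stripChars item "#") " "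

-- A: title = None; for item in items: if heading: title = stripped; raise if still None
def extract_title (markdown : String) : String :=
  let title : Option String :=
    (PySem.Str.splitlines markdown).foldl
      (fun title item => if pvIsHeading item then some (pvStripTitle item) else title) none
  match title with
  | none => ""          -- Python: raise Exception("No title"); excluded by Pre_
  | some t => t

-- ===== PORT B =====
-- reverse search: first heading of the reversed line list
def pvFindRev : List String → Option String
  | [] => none
  | item :: rest => if pvIsHeading item then some (pvStripTitle item) else pvFindRev rest

def extract_title_alt (markdown : String) : String :=
  match pvFindRev (PySem.Str.splitlines markdown).reverse with
  | some t => t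
  | none => ""          -- Python: raise Exception("No title"); excluded by Pre_

-- ===== PRECONDITION & SPEC =====
-- Pre_: some line is a heading — exactly the inputs on which A returns (otherwise A raises
-- Exception("No title"), and B raises the same).
def Pre_extract_title (markdown : String) : Prop :=
  (PySem.Str.splitlines markdown).any pvIsHeading = true
instance (markdown : String) : Decidable (Pre_extract_title markdown) := by
  unfold Pre_extract_title; infer_instance
def pvWitness_extract_title : String := "# Hello"

def Spec_extract_title (markdown : String) (out : String) : Prop := out = extract_title_alt markdown
instance (markdown : String) (out : String) : Decidable (Spec_extract_title markdown out) := by unfold Spec_extract_title; infer_instance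

-- ===== CLAIM (what is proved, stated in full; the proofs are below) =====
def Claim_equal_extract_title : Prop := ∀ (markdown : String), Dom_extract_title markdown → Pre_extract_title markdown → Spec_extract_title markdown (extract_title markdown)

-- ===== LEMMAS AND PROOFS =====

theorem pvFindRev_append (a b : List String) :
    pvFindRev (a ++ b) = (pvFindRev a).or (pvFindRev b) := by
  induction a with
  | nil => simp [pvFindRev]
  | cons x xs ih =>
      simp only [List.cons_append, pvFindRev, ih]
      split <;> simp

-- A's fold keeps the LAST heading = B's first heading of the reversed list
theorem foldl_eq_findRev (l : List String) (acc : Option String) :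
    l.foldl (fun title item => if pvIsHeading item then some (pvStripTitle item) else title) acc
      = (pvFindRev l.reverse).or acc := by
  induction l generalizing acc with
  | nil => simp [pvFindRev]
  | cons x xs ih =>
      simp only [List.foldl_cons, ih, List.reverse_cons, pvFindRev_append, Option.or_assoc]
      congr 1
      simp only [pvFindRev]
      split <;> simp

-- ===== VERDICT (by name: the statement is the Claim_ definition above) =====
theorem extract_title_spec : Claim_equal_extract_title := by
  intro markdown _ _
  unfold Spec_extract_title extract_title extract_title_alt
  simp only [foldl_eq_findRev, Option.or_none]
  cases pvFindRev (PySem.Str.splitlines markdown).reverse <;> rfl
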